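-- pv_equiv track=rewrite | github.com/MrBrantCode/unitest_baseline | mut_generate/mist_train_taco/taco_9210/solution.py | determine_road_placement
-- ===== SOURCE A (Python) =====
-- def determine_road_placement(n, m, roads):
--     # Initialize the road list with additional information
--     road = [[i, roads[i][0], roads[i][1], 'NONE'] for i in range(m)]
--
--     # Normalize the road endpoints to be zero-indexed and sorted
--     for i in road:
--         if i[2] < i[1]:
--             (i[1], i[2]) = (i[2], i[1])
--         (i[1], i[2]) = (i[1] - 1, i[2] - 1)
--
--     # Determine which roads intersect
--     participation = [[] for _ in range(m)]
--     for i in range(len(road)):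
--         for j in range(i + 1, len(road)):
--             if (road[j][1] < road[i][1] < road[j][2]) ^ (road[j][1] < road[i][2] < road[j][2]):
--                 if road[j][1] != road[i][1] and road[j][2] != road[i][1] and road[j][1] != road[i][2] and road[j][2] != road[i][2]:
--                     participation[i].append(j)
--                     participation[j].append(i)
--
--     # Determine the placement of each road
--     result = ''
--     mark = [0] * m
--     stack = []
--
--     while sum(mark) != m:
--         if not stack:
--             for i in range(len(mark)):
--                 if mark[i] == 0:
--                     stack.append(i)
--                     break
--         index = stack.pop()
--         mark[index] = 1
--         if road[index][3] == 'NONE':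
--             road[index][3] = 'i'
--         for i in participation[index]:
--             if road[i][3] == road[index][3]:
--                 return 'Impossible'
--             elif road[index][3] != 'i' and road[i][3] == 'NONE':
--                 road[i][3] = 'i'
--                 stack.append(i)
--             elif road[index][3] == 'i' and road[i][3] == 'NONE':
--                 road[i][3] = 'o'
--                 stack.append(i)
--
--     # Collect the result
--     for i in road:
--         result += i[3]
--
--     return result
-- ===== SOURCE B (Python) =====
-- def determine_road_placement(n, m, roads):
--     # Normalize endpoints to zero-indexed sorted pairs
--     ends = []
--     for k in range(m):
--         a, b = roads[k][0], roads[k][1]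
--         if b < a:
--             a, b = b, a
--         ends.append((a - 1, b - 1))
--
--     # Union-find with parity; unions always hang the larger root under the
--     # smaller, so each component's root is its minimum-index member.
--     parent = list(range(m))
--     par = [0] * m  # parity of the edge to the parent
--
--     def find(x):
--         p = 0
--         while parent[x] != x:
--             p ^= par[x]
--             x = parent[x]
--         return x, p
--
--     for i in range(m):
--         ai, bi = ends[i]
--         for j in range(i + 1, m):
--             aj, bj = ends[j]
--             if ((aj < ai < bj) != (aj < bi < bj)) and aj != ai and bj != ai and aj != bi and bj != bi:
--                 ri, pi = find(i)
--                 rj, pj = find(j)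
--                 if ri == rj:
--                     if pi == pj:
--                         return 'Impossible'
--                 elif ri < rj:
--                     parent[rj] = ri
--                     par[rj] = pi ^ pj ^ 1
--                 else:
--                     parent[ri] = rj
--                     par[ri] = pi ^ pj ^ 1
--
--     return ''.join('i' if find(k)[1] == 0 else 'o' for k in range(m))
-- ===== Notes on version B (the rewrite author's own statement) =====
-- stated objective: alternative
-- what changed: The DFS/stack 2-coloring with mark array and anchor rescan is replaced by a union-find with parity to the root; unions always hang the larger root under the smaller, so each component's root is its minimum-index member and the final colors are read off as parity-to-root, with 'Impossible' returned the moment a union would force two connected roads to share a side.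
import Mathlib
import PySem

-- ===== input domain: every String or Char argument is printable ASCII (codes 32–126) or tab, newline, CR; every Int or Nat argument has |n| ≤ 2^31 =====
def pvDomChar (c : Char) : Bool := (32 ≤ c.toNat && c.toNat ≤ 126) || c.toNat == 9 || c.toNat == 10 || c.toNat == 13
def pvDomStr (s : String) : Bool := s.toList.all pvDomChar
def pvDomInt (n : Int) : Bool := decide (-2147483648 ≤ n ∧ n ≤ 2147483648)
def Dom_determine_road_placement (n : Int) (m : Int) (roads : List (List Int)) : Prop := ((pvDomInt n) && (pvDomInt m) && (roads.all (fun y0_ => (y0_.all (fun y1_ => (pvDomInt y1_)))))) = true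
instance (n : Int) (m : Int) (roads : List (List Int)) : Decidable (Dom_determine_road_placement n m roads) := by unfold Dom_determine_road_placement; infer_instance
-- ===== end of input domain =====

-- B replaces A's DFS/stack 2-coloring by a parity union-find whose unions hang the larger
-- root under the smaller (so each component's root is its minimum-index member); same cost class.

-- ===== PORT A =====
-- Python: road = [[i, roads[i][0], roads[i][1], 'NONE'] for i in range(m)]
def aBuildRoad (m : Nat) (roads : List (List Int)) : List (Int × Int × Int × String) :=
  (List.range m).map (fun (i : Nat) =>
    let r := (roads[i]?).getD []
    ((i : Int), (r[0]?).getD 0, (r[1]?).getD 0, "NONE"))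

-- Python: the normalization for-loop (swap so i[1] ≤ i[2], then subtract 1 from both)
def aNormalize (road : List (Int × Int × Int × String)) : List (Int × Int × Int × String) :=
  road.map (fun t =>
    let ab := if t.2.2.1 < t.2.1 then (t.2.2.1, t.2.1) else (t.2.1, t.2.2.1)
    (t.1, ab.1 - 1, ab.2 - 1, t.2.2.2))

-- Python: (road[j][1] < road[i][1] < road[j][2]) ^ (road[j][1] < road[i][2] < road[j][2])
--         together with the four endpoint-inequality tests of the inner `if`
def aInterlace (ri rj : Int × Int × Int × String) : Bool :=
  ((decide (rj.2.1 < ri.2.1) && decide (ri.2.1 < rj.2.2.1)) ^^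
   (decide (rj.2.1 < ri.2.2.1) && decide (ri.2.2.1 < rj.2.2.1)))
  && (rj.2.1 != ri.2.1) && (rj.2.2.1 != ri.2.1) && (rj.2.1 != ri.2.2.1) && (rj.2.2.1 != ri.2.2.1)

-- Python: participation[i].append(j); participation[j].append(i)
def aAddEdge (P : List (List Nat)) (i j : Nat) : List (List Nat) :=
  let P1 := P.set i (((P[i]?).getD []) ++ [j])
  P1.set j (((P1[j]?).getD []) ++ [i])

-- Python: the nested i/j loops building participation
def aPartic (road : List (Int × Int × Int × String)) : List (List Nat) :=
  (List.range road.length).foldl (fun P i =>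
    ((List.range road.length).drop (i + 1)).foldl (fun P j =>
      if aInterlace ((road[i]?).getD (0, 0, 0, "")) ((road[j]?).getD (0, 0, 0, "")) then
        aAddEdge P i j
      else P) P)
    ((List.range road.length).map (fun _ => ([] : List Nat)))

-- road[i][3] (the colour field); "" for an out-of-range index
def colOf (road : List (Int × Int × Int × String)) (i : Nat) : String :=
  ((road[i]?).map (fun t => t.2.2.2)).getD ""

-- road[i][3] = c
def setCol (road : List (Int × Int × Int × String)) (i : Nat) (c : String) :
    List (Int × Int × Int × String) :=
  match road[i]? with
  | some t => road.set i (t.1, t.2.1, t.2.2.1, c)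
  | none => road

def aNoneCount (road : List (Int × Int × Int × String)) : Nat :=
  road.countP (fun t => t.2.2.2 == "NONE")

-- Python: the for-loop over participation[index] inside the while loop
def aProcess (index : Nat) : List Nat → List (Int × Int × Int × String) → List Nat →
    Option (List (Int × Int × Int × String) × List Nat)
  | [], road, stack => some (road, stack)
  | i :: rest, road, stack =>
    if colOf road i == colOf road index then none
    else if colOf road index != "i" && colOf road i == "NONE" then
      aProcess index rest (setCol road i "i") (i :: stack)
    else if colOf road index == "i" && colOf road i == "NONE" then
      aProcess index rest (setCol road i "o") (i :: stack)
    else aProcess index rest road stack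

-- (termination helpers for the while loop, cited by aLoop's decreasing_by)
theorem length_setCol (road : List (Int × Int × Int × String)) (i : Nat) (c : String) :
    (setCol road i c).length = road.length := by
  unfold setCol; cases h : road[i]? <;> simp

theorem setCol_noneCount_le (road : List (Int × Int × Int × String)) (i : Nat) (c : String)
    (hc : (c == "NONE") = false) : aNoneCount (setCol road i c) ≤ aNoneCount road := by
  unfold setCol
  cases h : road[i]? with
  | none => simp
  | some t =>
    obtain ⟨hi, hval⟩ := List.getElem?_eq_some_iff.mp h
    simp only [aNoneCount, List.countP_set hi, hc, Bool.false_eq_true, if_false]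
    split <;> omega

theorem setCol_noneCount_lt (road : List (Int × Int × Int × String)) (i : Nat)
    (h : colOf road i = "NONE") (c : String) (hc : (c == "NONE") = false) :
    aNoneCount (setCol road i c) + 1 = aNoneCount road := by
  unfold setCol
  cases hg : road[i]? with
  | none => simp [colOf, hg] at h
  | some t =>
    obtain ⟨hi, hval⟩ := List.getElem?_eq_some_iff.mp hg
    have ht : t.2.2.2 = "NONE" := by simpa [colOf, hg] using h
    have hP : (fun t : Int × Int × Int × String => t.2.2.2 == "NONE") road[i] = true := by
      simp [hval, ht]
    have hpos : 0 < road.countP (fun t => t.2.2.2 == "NONE") :=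
      List.countP_pos_iff.mpr ⟨road[i], List.getElem_mem hi, hP⟩
    simp [aNoneCount, List.countP_set hi, hP, hc]
    omega

theorem aProcess_meas (index : Nat) (nbrs : List Nat) :
    ∀ road stack road' stack', aProcess index nbrs road stack = some (road', stack') →
      aNoneCount road' + stack'.length ≤ aNoneCount road + stack.length ∧
      road'.length = road.length := by
  induction nbrs with
  | nil =>
    intro road stack road' stack' h
    simp [aProcess] at h
    simp [h.1, h.2]
  | cons i rest ih =>
    intro road stack road' stack' h
    simp only [aProcess] at h
    split at h
    · exact absurd h (by simp)
    · split at h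
      · rename_i h1 h2
        have hN : colOf road i = "NONE" := by
          have := (Bool.and_eq_true _ _).mp h2
          simpa using this.2
        have hrec := ih _ _ _ _ h
        have hlt := setCol_noneCount_lt road i hN "i" (by decide)
        have hlen := length_setCol road i "i"
        refine ⟨?_, by rw [hrec.2, hlen]⟩
        have := hrec.1
        simp only [List.length_cons] at this
        omega
      · split at h
        · rename_i h1 h2 h3
          have hN : colOf road i = "NONE" := by
            have := (Bool.and_eq_true _ _).mp h3
            simpa using this.2
          have hrec := ih _ _ _ _ h
          have hlt := setCol_noneCount_lt road i hN "o" (by decide)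
          have hlen := length_setCol road i "o"
          refine ⟨?_, by rw [hrec.2, hlen]⟩
          have := hrec.1
          simp only [List.length_cons] at this
          omega
        · exact ih _ _ _ _ h

theorem count_false_set_true (mark : List Bool) (i : Nat) (hi : i < mark.length)
    (hv : mark[i] = false) : (mark.set i true).count false + 1 = mark.count false := by
  have hP : (fun b => b == false) mark[i] = true := by simp [hv]
  have hpos : 0 < mark.countP (fun b => b == false) :=
    List.countP_pos_iff.mpr ⟨mark[i], List.getElem_mem hi, hP⟩
  simp only [List.count_eq_countP, List.countP_set hi, hP, if_true]
  simp only [show ((true == false) = true) = False by simp, if_false]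
  omega

theorem count_false_set_true_le (mark : List Bool) (i : Nat) :
    (mark.set i true).count false ≤ mark.count false := by
  by_cases hi : i < mark.length
  · simp only [List.count_eq_countP, List.countP_set hi]
    split <;> simp <;> omega
  · rw [List.set_eq_of_length_le (by omega)]

-- Python: the while loop
def aLoop (partic : List (List Nat)) (m : Nat) (road : List (Int × Int × Int × String))
    (mark : List Bool) (stack : List Nat) : Option (List (Int × Int × Int × String)) :=
  if mark.count true ≠ m then
    match stack with
    | [] =>
      match hf : mark.findIdx? (fun b => b == false) with
      | none => some road
      | some index =>
        match hp : aProcess index ((partic[index]?).getD [])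
            (if colOf road index == "NONE" then setCol road index "i" else road) [] with
        | none => none
        | some rs => aLoop partic m rs.1 (mark.set index true) rs.2
    | index :: rest =>
      match hp : aProcess index ((partic[index]?).getD [])
          (if colOf road index == "NONE" then setCol road index "i" else road) rest with
      | none => none
      | some rs => aLoop partic m rs.1 (mark.set index true) rs.2
  else some road
termination_by 2 * mark.count false + aNoneCount road + stack.length
decreasing_by
  · have hm := aProcess_meas index ((partic[index]?).getD []) _ _ _ _ hp
    simp only [dite_eq_ite] at hm
    obtain ⟨hi, hvi, -⟩ := List.findIdx?_eq_some_iff_getElem.mp hf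
    have hv : mark[index] = false := by simpa using hvi
    have hcf := count_false_set_true mark index hi hv
    have h1 : aNoneCount (if colOf road index == "NONE" then setCol road index "i" else road)
        ≤ aNoneCount road := by
      split
      · exact setCol_noneCount_le road index "i" (by decide)
      · omega
    omega
  · have hm := aProcess_meas index ((partic[index]?).getD []) _ _ _ _ hp
    simp only [dite_eq_ite] at hm
    have hcf := count_false_set_true_le mark index
    have h1 : aNoneCount (if colOf road index == "NONE" then setCol road index "i" else road)
        ≤ aNoneCount road := by
      split
      · exact setCol_noneCount_le road index "i" (by decide)
      · omega
    simp only [List.length_cons] at *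
    omega

def determine_road_placement (n : Int) (m : Int) (roads : List (List Int)) : String :=
  let road := aNormalize (aBuildRoad m.toNat roads)
  let partic := aPartic road
  match aLoop partic m.toNat road (List.replicate m.toNat false) [] with
  | none => "Impossible"
  | some road2 => road2.foldl (fun s t => s ++ t.2.2.2) ""

-- ===== PORT B =====
-- normalized zero-indexed endpoint pairs
def bEnds (m : Nat) (roads : List (List Int)) : List (Int × Int) :=
  (List.range m).map (fun (k : Nat) =>
    let r := (roads[k]?).getD []
    let a := (r[0]?).getD 0
    let b := (r[1]?).getD 0
    let ab := if b < a then (b, a) else (a, b)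
    (ab.1 - 1, ab.2 - 1))

-- the interlacing test of Source B's inner loop
def bInterlace (e f : Int × Int) : Bool :=
  ((decide (f.1 < e.1) && decide (e.1 < f.2)) ^^ (decide (f.1 < e.2) && decide (e.2 < f.2)))
  && (f.1 != e.1) && (f.2 != e.1) && (f.1 != e.2) && (f.2 != e.2)

-- find(x): walk the parent chain accumulating parity (parents are strictly smaller)
def bFind (parent : List Nat) (par : List Bool) (x : Nat) (p : Bool) : Nat × Bool :=
  let y := (parent[x]?).getD x
  if h : y < x then bFind parent par y (p ^^ (par[x]?).getD false) else (x, p)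
termination_by x

-- the union of roads i and j with opposite colours (none = Impossible)
def bUnion (parent : List Nat) (par : List Bool) (i j : Nat) :
    Option (List Nat × List Bool) :=
  let fi := bFind parent par i false
  let fj := bFind parent par j false
  if fi.1 == fj.1 then
    if fi.2 == fj.2 then none else some (parent, par)
  else if fi.1 < fj.1 then
    some (parent.set fj.1 fi.1, par.set fj.1 (fi.2 ^^ fj.2 ^^ true))
  else
    some (parent.set fi.1 fj.1, par.set fi.1 (fi.2 ^^ fj.2 ^^ true))

-- the nested i/j loops of Source B
def bLoop (m : Nat) (ends : List (Int × Int)) : Option (List Nat × List Bool) :=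
  (List.range m).foldl (fun ost i =>
    ((List.range m).drop (i + 1)).foldl (fun ost2 j =>
      ost2.bind (fun st =>
        if bInterlace ((ends[i]?).getD (0, 0)) ((ends[j]?).getD (0, 0)) then
          bUnion st.1 st.2 i j
        else some st)) ost) (some (List.range m, List.replicate m false))

def determine_road_placement_alt (n : Int) (m : Int) (roads : List (List Int)) : String :=
  let ends := bEnds m.toNat roads
  match bLoop m.toNat ends with
  | none => "Impossible"
  | some st =>
    String.join ((List.range m.toNat).map (fun k =>
      if (bFind st.1 st.2 k false).2 then "o" else "i"))

-- ===== PRECONDITION & SPEC =====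
-- Pre_ excludes exactly the inputs on which Python A raises: a negative m (stack.pop from an
-- empty stack), m exceeding len(roads), or a road among the first m with fewer than 2 entries
-- (IndexError on roads[i][0]/roads[i][1]).
def Pre_determine_road_placement (n : Int) (m : Int) (roads : List (List Int)) : Prop :=
  0 ≤ m ∧ m ≤ (roads.length : Int) ∧ ∀ r ∈ roads.take m.toNat, 2 ≤ r.length
instance (n : Int) (m : Int) (roads : List (List Int)) :
    Decidable (Pre_determine_road_placement n m roads) := by
  unfold Pre_determine_road_placement; infer_instance

def pvWitness_determine_road_placement : Int × Int × List (List Int) := (4, 2, [[1, 3], [2, 4]])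

def Spec_determine_road_placement (n : Int) (m : Int) (roads : List (List Int)) (out : String) : Prop := out = determine_road_placement_alt n m roads
instance (n : Int) (m : Int) (roads : List (List Int)) (out : String) : Decidable (Spec_determine_road_placement n m roads out) := by unfold Spec_determine_road_placement; infer_instance

-- ===== CLAIM (what is proved, stated in full; the proofs are below) =====
def Claim_equal_determine_road_placement : Prop := ∀ (n : Int) (m : Int) (roads : List (List Int)), Dom_determine_road_placement n m roads → Pre_determine_road_placement n m roads → Spec_determine_road_placement n m roads (determine_road_placement n m roads)
-- ===== LEMMAS AND PROOFS =====

-- The common specification: the interlacing graph, walks with parity, and the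
-- "anchored proper colouring" both programs compute.

def edgeB (ends : List (Int × Int)) (i j : Nat) : Bool :=
  ((decide (i < j) && bInterlace ((ends[i]?).getD (0, 0)) ((ends[j]?).getD (0, 0))) ||
   (decide (j < i) && bInterlace ((ends[j]?).getD (0, 0)) ((ends[i]?).getD (0, 0))))
  && decide (i < ends.length) && decide (j < ends.length)

inductive WalkP (ends : List (Int × Int)) : Nat → Nat → Bool → Prop
  | nil (x : Nat) : WalkP ends x x false
  | cons {x y z : Nat} {p : Bool} :
      edgeB ends x y = true → WalkP ends y z p → WalkP ends x z (!p)

def GoodG (ends : List (Int × Int)) : Prop := ∀ x p, WalkP ends x x p → p = false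
def ConnG (ends : List (Int × Int)) (x y : Nat) : Prop := ∃ p, WalkP ends x y p
def IsMinOf (ends : List (Int × Int)) (a : Nat) : Prop := ∀ y, ConnG ends a y → a ≤ y

def render (p : Bool) : String := if p then "o" else "i"

theorem edgeB_symm (ends : List (Int × Int)) (i j : Nat) :
    edgeB ends i j = true ↔ edgeB ends j i = true := by
  simp only [edgeB, Bool.and_eq_true, Bool.or_eq_true, decide_eq_true_eq]
  tauto

theorem edgeB_bounds (ends : List (Int × Int)) {i j : Nat} (h : edgeB ends i j = true) :
    i < ends.length ∧ j < ends.length := by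
  simp only [edgeB, Bool.and_eq_true, Bool.or_eq_true, decide_eq_true_eq] at h
  tauto

theorem WalkP.edge {ends : List (Int × Int)} {i j : Nat} (h : edgeB ends i j = true) :
    WalkP ends i j true := by
  have := WalkP.cons h (WalkP.nil j); simpa using this

theorem WalkP.trans {ends : List (Int × Int)} {x y z : Nat} {p q : Bool}
    (h1 : WalkP ends x y p) (h2 : WalkP ends y z q) : WalkP ends x z (p ^^ q) := by
  induction h1 with
  | nil => simpa using h2
  | @cons _ _ _ p' h w ih =>
    have := WalkP.cons h (ih h2)
    have hb : (!(p' ^^ q)) = ((!p') ^^ q) := by cases p' <;> cases q <;> rfl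
    rwa [hb] at this

theorem WalkP.symm {ends : List (Int × Int)} {x y : Nat} {p : Bool}
    (h : WalkP ends x y p) : WalkP ends y x p := by
  induction h with
  | nil => exact WalkP.nil _
  | @cons x' y' z' p' h w ih =>
    have he : WalkP ends y' x' true := WalkP.edge ((edgeB_symm ends x' y').mp h)
    have := ih.trans he
    have hb : (p' ^^ true) = !p' := by cases p' <;> rfl
    rwa [hb] at this

theorem walk_closed {ends : List (Int × Int)} (M : Nat → Prop)
    (hM : ∀ a b, edgeB ends a b = true → M a → M b) {x y : Nat} {p : Bool}
    (h : WalkP ends x y p) (hx : M x) : M y := by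
  induction h with
  | nil => exact hx
  | cons h w ih => exact ih (hM _ _ h hx)

theorem min_unique {ends : List (Int × Int)} {a b : Nat}
    (ha : IsMinOf ends a) (hb : IsMinOf ends b) (h : ConnG ends a b) : a = b := by
  obtain ⟨p, w⟩ := h
  have h1 := ha b ⟨p, w⟩
  have h2 := hb a ⟨p, w.symm⟩
  omega

def ProperOn (ends : List (Int × Int)) (f : Nat → Bool) : Prop :=
  ∀ i j, edgeB ends i j = true → f i = !(f j)

theorem walk_parity {ends : List (Int × Int)} {f : Nat → Bool} (hf : ProperOn ends f)
    {x y : Nat} {p : Bool} (h : WalkP ends x y p) : f x = (p ^^ f y) := by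
  induction h with
  | nil => simp
  | @cons x' y' z' p' h w ih =>
    rw [hf _ _ h, ih]
    cases p' <;> cases f z' <;> rfl

theorem proper_good {ends : List (Int × Int)} {f : Nat → Bool} (hf : ProperOn ends f) :
    GoodG ends := by
  intro x p w
  have := walk_parity hf w
  cases p
  · rfl
  · cases hfx : f x <;> rw [hfx] at this <;> simp at this

theorem render_inj {p q : Bool} (h : render p = render q) : p = q := by
  cases p <;> cases q <;> first | rfl | (exfalso; simp [render] at h)

-- ---- A-side: the DFS loop computes an anchored proper colouring ----

def ColsOK (ends : List (Int × Int)) (road : List (Int × Int × Int × String)) : Prop :=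
  ∀ i, i < road.length → colOf road i = "NONE" ∨
    ∃ p a, colOf road i = render p ∧ WalkP ends i a p ∧ IsMinOf ends a

structure AInv (ends : List (Int × Int)) (road : List (Int × Int × Int × String))
    (mark : List Bool) (stack : List Nat) : Prop where
  lenR : road.length = ends.length
  lenM : mark.length = ends.length
  cols : ColsOK ends road
  stackMem : ∀ i ∈ stack, i < road.length ∧ colOf road i ≠ "NONE"
  markedCol : ∀ i, (hi : i < mark.length) → mark[i] = true → colOf road i ≠ "NONE"
  colMark : ∀ i, i < road.length → colOf road i ≠ "NONE" →
      (∃ hi : i < mark.length, mark[i] = true) ∨ i ∈ stack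
  markedNbrs : ∀ i, (hi : i < mark.length) → mark[i] = true → ∀ j, edgeB ends i j = true →
      colOf road j ≠ "NONE" ∧ colOf road j ≠ colOf road i

theorem colOf_setCol_self {road : List (Int × Int × Int × String)} {i : Nat}
    (h : i < road.length) (c : String) : colOf (setCol road i c) i = c := by
  simp [setCol, List.getElem?_eq_getElem h, colOf, List.getElem?_set_self h]

theorem colOf_setCol_ne {road : List (Int × Int × Int × String)} {i j : Nat}
    (h : j ≠ i) (c : String) : colOf (setCol road i c) j = colOf road j := by
  unfold setCol
  cases hg : road[i]? with
  | none => rfl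
  | some t => simp [colOf, List.getElem?_set_ne (Ne.symm h)]

theorem aProcess_spec (ends : List (Int × Int)) (index : Nat) (nbrs : List Nat)
    (hnb : ∀ j ∈ nbrs, edgeB ends index j = true) :
    ∀ road stack, road.length = ends.length → ColsOK ends road →
    (∀ i ∈ stack, i < road.length ∧ colOf road i ≠ "NONE") →
    index < road.length → colOf road index ≠ "NONE" →
    match aProcess index nbrs road stack with
    | none => ¬ GoodG ends
    | some (road', stack') =>
        road'.length = road.length ∧
        (∀ i, colOf road i ≠ "NONE" → colOf road' i = colOf road i) ∧
        (∀ i, colOf road' i ≠ colOf road i → colOf road i = "NONE" ∧ i ∈ stack') ∧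
        (∀ i ∈ stack', i ∈ stack ∨ i ∈ nbrs) ∧
        (∀ i ∈ stack, i ∈ stack') ∧
        ColsOK ends road' ∧
        (∀ i ∈ stack', i < road'.length ∧ colOf road' i ≠ "NONE") ∧
        (∀ j ∈ nbrs, colOf road' j ≠ "NONE" ∧ colOf road' j ≠ colOf road' index) := by
  induction nbrs with
  | nil =>
    intro road stack hlen hcols hstk hidx hcidx
    exact ⟨rfl, fun i _ => rfl, fun i h => absurd rfl h, fun i h => Or.inl h,
      fun i h => h, hcols, hstk, fun j hj => absurd hj (by simp)⟩
  | cons i rest ih =>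
    intro road stack hlen hcols hstk hidx hcidx
    have hedge : edgeB ends index i = true := hnb i (by simp)
    have hi : i < road.length := by rw [hlen]; exact (edgeB_bounds ends hedge).2
    obtain ⟨px, ax, hcx, wx, hmx⟩ :=
      (hcols index hidx).resolve_left (fun h => hcidx h)
    have hrend : ∀ p : Bool, render p ≠ "NONE" ∧ render p ≠ "" := by
      intro p; cases p <;> simp [render]
    simp only [aProcess]
    by_cases hb1 : colOf road i = colOf road index
    · rw [if_pos (by simp [hb1])]
      -- a conflict: two adjacent roads already carry the same colour
      intro hGood
      have hciN : colOf road i ≠ "NONE" := by rw [hb1, hcx]; exact (hrend px).1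
      obtain ⟨pi, ai, hci, wi, hmi⟩ := (hcols i hi).resolve_left (fun h => hciN h)
      have hpp : pi = px := render_inj (by rw [← hci, ← hcx, hb1])
      have hconn : ConnG ends ai ax :=
        ⟨_, (wi.symm.trans ((WalkP.edge ((edgeB_symm ends index i).mp hedge)).trans wx))⟩
      have haa : ai = ax := min_unique hmi hmx hconn
      have wclosed := wx.trans ((haa ▸ wi.symm).trans
        (WalkP.edge ((edgeB_symm ends index i).mp hedge)))
      have := hGood index _ wclosed
      rw [hpp] at this
      cases px <;> simp at this
    · rw [if_neg (by simp [hb1])]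
      by_cases hb2 : colOf road index ≠ "i" ∧ colOf road i = "NONE"
      · rw [if_pos (by simp [hb2.1, hb2.2])]
        have hpx : px = true := by
          cases px
          · exact absurd hcx hb2.1
          · rfl
        have hii : i ≠ index := fun h => hcidx (h ▸ hb2.2)
        have hlen1 : (setCol road i "i").length = road.length := length_setCol road i "i"
        have hc1i : colOf (setCol road i "i") i = "i" := colOf_setCol_self hi "i"
        have hc1ne : ∀ k, k ≠ i → colOf (setCol road i "i") k = colOf road k :=
          fun k hk => colOf_setCol_ne hk "i"
        have hc1idx : colOf (setCol road i "i") index = colOf road index :=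
          hc1ne index (fun h => hii h.symm)
        have hcols1 : ColsOK ends (setCol road i "i") := by
          intro k hk
          rw [hlen1] at hk
          by_cases hki : k = i
          · subst hki
            refine Or.inr ⟨false, ax, by rw [hc1i]; rfl, ?_, hmx⟩
            have hw := (WalkP.edge ((edgeB_symm ends index k).mp hedge)).trans wx
            rw [hpx] at hw
            simpa using hw
          · rw [hc1ne k hki]
            exact hcols k hk
        have hstk1 : ∀ k ∈ (i :: stack), k < (setCol road i "i").length ∧
            colOf (setCol road i "i") k ≠ "NONE" := by
          intro k hk
          rcases List.mem_cons.mp hk with h | h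
          · subst h; rw [hlen1, hc1i]; exact ⟨hi, by simp⟩
          · obtain ⟨h1, h2⟩ := hstk k h
            by_cases hki : k = i
            · subst hki; rw [hlen1, hc1i]; exact ⟨h1, by simp⟩
            · rw [hlen1, hc1ne k hki]; exact ⟨h1, h2⟩
        have hrec := ih (fun j hj => hnb j (by simp [hj])) (setCol road i "i") (i :: stack)
          (by rw [hlen1, hlen]) hcols1 hstk1 (by rw [hlen1]; exact hidx)
          (by rw [hc1idx]; exact hcidx)
        cases hres : aProcess index rest (setCol road i "i") (i :: stack) with
        | none => rw [hres] at hrec; exact hrec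
        | some rs =>
          obtain ⟨road2, stack2⟩ := rs
          rw [hres] at hrec
          obtain ⟨e1, e2, e3, e4, e5, e6, e7, e8⟩ := hrec
          refine ⟨by rw [e1, hlen1], ?_, ?_, ?_, ?_, e6, e7, ?_⟩
          · intro k hk
            have hki : k ≠ i := fun h => hk (h ▸ hb2.2)
            rw [e2 k (by rw [hc1ne k hki]; exact hk), hc1ne k hki]
          · intro k hk
            by_cases hki : k = i
            · subst hki
              exact ⟨hb2.2, e5 k (by simp)⟩
            · have hk1 : colOf road2 k ≠ colOf (setCol road i "i") k := by
                rw [hc1ne k hki]; exact hk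
              obtain ⟨hN, hmem⟩ := e3 k hk1
              rw [hc1ne k hki] at hN
              exact ⟨hN, hmem⟩
          · intro k hk
            rcases e4 k hk with h | h
            · rcases List.mem_cons.mp h with h2 | h2
              · subst h2; exact Or.inr (by simp)
              · exact Or.inl h2
            · exact Or.inr (by simp [h])
          · intro k hk
            exact e5 k (by simp [hk])
          · intro j hj
            rcases List.mem_cons.mp hj with h | h
            · subst h
              have hcol2j : colOf road2 j = "i" := by
                rw [e2 j (by rw [hc1i]; simp), hc1i]
              have hcol2x : colOf road2 index = colOf road index := by
                rw [e2 index (by rw [hc1idx]; exact hcidx), hc1idx]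
              rw [hcol2j, hcol2x]
              refine ⟨by simp, ?_⟩
              exact fun h => hb2.1 h.symm
            · exact e8 j h
      · rw [if_neg (by simp only [Bool.and_eq_true, bne_iff_ne, beq_iff_eq]; exact hb2)]
        by_cases hb3 : colOf road index = "i" ∧ colOf road i = "NONE"
        · rw [if_pos (by simp [hb3.1, hb3.2])]
          have hpx : px = false := by
            cases px
            · rfl
            · exact absurd (hcx.symm.trans hb3.1) (by decide)
          have hii : i ≠ index := fun h => hcidx (h ▸ hb3.2)
          have hlen1 : (setCol road i "o").length = road.length := length_setCol road i "o"
          have hc1i : colOf (setCol road i "o") i = "o" := colOf_setCol_self hi "o"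
          have hc1ne : ∀ k, k ≠ i → colOf (setCol road i "o") k = colOf road k :=
            fun k hk => colOf_setCol_ne hk "o"
          have hc1idx : colOf (setCol road i "o") index = colOf road index :=
            hc1ne index (fun h => hii h.symm)
          have hcols1 : ColsOK ends (setCol road i "o") := by
            intro k hk
            rw [hlen1] at hk
            by_cases hki : k = i
            · subst hki
              refine Or.inr ⟨true, ax, by rw [hc1i]; rfl, ?_, hmx⟩
              have hw := (WalkP.edge ((edgeB_symm ends index k).mp hedge)).trans wx
              rw [hpx] at hw
              simpa using hw
            · rw [hc1ne k hki]
              exact hcols k hk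
          have hstk1 : ∀ k ∈ (i :: stack), k < (setCol road i "o").length ∧
              colOf (setCol road i "o") k ≠ "NONE" := by
            intro k hk
            rcases List.mem_cons.mp hk with h | h
            · subst h; rw [hlen1, hc1i]; exact ⟨hi, by simp⟩
            · obtain ⟨h1, h2⟩ := hstk k h
              by_cases hki : k = i
              · subst hki; rw [hlen1, hc1i]; exact ⟨h1, by simp⟩
              · rw [hlen1, hc1ne k hki]; exact ⟨h1, h2⟩
          have hrec := ih (fun j hj => hnb j (by simp [hj])) (setCol road i "o") (i :: stack)
            (by rw [hlen1, hlen]) hcols1 hstk1 (by rw [hlen1]; exact hidx)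
            (by rw [hc1idx]; exact hcidx)
          cases hres : aProcess index rest (setCol road i "o") (i :: stack) with
          | none => rw [hres] at hrec; exact hrec
          | some rs =>
            obtain ⟨road2, stack2⟩ := rs
            rw [hres] at hrec
            obtain ⟨e1, e2, e3, e4, e5, e6, e7, e8⟩ := hrec
            refine ⟨by rw [e1, hlen1], ?_, ?_, ?_, ?_, e6, e7, ?_⟩
            · intro k hk
              have hki : k ≠ i := fun h => hk (h ▸ hb3.2)
              rw [e2 k (by rw [hc1ne k hki]; exact hk), hc1ne k hki]
            · intro k hk
              by_cases hki : k = i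
              · subst hki
                exact ⟨hb3.2, e5 k (by simp)⟩
              · have hk1 : colOf road2 k ≠ colOf (setCol road i "o") k := by
                  rw [hc1ne k hki]; exact hk
                obtain ⟨hN, hmem⟩ := e3 k hk1
                rw [hc1ne k hki] at hN
                exact ⟨hN, hmem⟩
            · intro k hk
              rcases e4 k hk with h | h
              · rcases List.mem_cons.mp h with h2 | h2
                · subst h2; exact Or.inr (by simp)
                · exact Or.inl h2
              · exact Or.inr (by simp [h])
            · intro k hk
              exact e5 k (by simp [hk])
            · intro j hj
              rcases List.mem_cons.mp hj with h | h
              · subst h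
                have hcol2j : colOf road2 j = "o" := by
                  rw [e2 j (by rw [hc1i]; simp), hc1i]
                have hcol2x : colOf road2 index = colOf road index := by
                  rw [e2 index (by rw [hc1idx]; exact hcidx), hc1idx]
                rw [hcol2j, hcol2x]
                refine ⟨by simp, ?_⟩
                rw [hb3.1]
                simp
              · exact e8 j h
        · rw [if_neg (by simp only [Bool.and_eq_true, bne_iff_ne, beq_iff_eq]; exact hb3)]
          have hciN : colOf road i ≠ "NONE" := by
            intro h
            by_cases hcxi : colOf road index = "i"
            · exact hb3 ⟨hcxi, h⟩
            · exact hb2 ⟨hcxi, h⟩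
          have hrec := ih (fun j hj => hnb j (by simp [hj])) road stack hlen hcols hstk hidx hcidx
          cases hres : aProcess index rest road stack with
          | none => rw [hres] at hrec; exact hrec
          | some rs =>
            obtain ⟨road2, stack2⟩ := rs
            rw [hres] at hrec
            obtain ⟨e1, e2, e3, e4, e5, e6, e7, e8⟩ := hrec
            refine ⟨e1, e2, e3, ?_, e5, e6, e7, ?_⟩
            · intro k hk
              rcases e4 k hk with h | h
              · exact Or.inl h
              · exact Or.inr (by simp [h])
            · intro j hj
              rcases List.mem_cons.mp hj with h | h
              · subst h
                rw [e2 j hciN, e2 index hcidx]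
                exact ⟨hciN, hb1⟩
              · exact e8 j h

theorem aPost_inv (ends : List (Int × Int)) (partic : List (List Nat))
    (HP : ∀ i j, (j ∈ (partic[i]?).getD []) ↔ edgeB ends i j = true)
    (road road1 road2 : List (Int × Int × Int × String)) (mark : List Bool)
    (stack0 rest stack2 : List Nat) (index : Nat)
    (hInv : AInv ends road mark stack0)
    (hidx : index < road.length)
    (hrest : ∀ i ∈ rest, i ∈ stack0)
    (hstack0 : ∀ i ∈ stack0, i = index ∨ i ∈ rest)
    (hroad1len : road1.length = road.length)
    (h1ne : ∀ k, k ≠ index → colOf road1 k = colOf road k)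
    (h1idx : colOf road1 index ≠ "NONE")
    (h1eq : colOf road index ≠ "NONE" → colOf road1 index = colOf road index)
    (e1 : road2.length = road1.length)
    (e2 : ∀ k, colOf road1 k ≠ "NONE" → colOf road2 k = colOf road1 k)
    (e3 : ∀ k, colOf road2 k ≠ colOf road1 k → colOf road1 k = "NONE" ∧ k ∈ stack2)
    (e5 : ∀ k ∈ rest, k ∈ stack2)
    (e6 : ColsOK ends road2)
    (e7 : ∀ k ∈ stack2, k < road2.length ∧ colOf road2 k ≠ "NONE")
    (e8 : ∀ j ∈ (partic[index]?).getD [],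
      colOf road2 j ≠ "NONE" ∧ colOf road2 j ≠ colOf road2 index) :
    AInv ends road2 (mark.set index true) stack2 := by
  have hmidx : index < mark.length := by rw [hInv.lenM, ← hInv.lenR]; omega
  have hlen2 : road2.length = road.length := by rw [e1, hroad1len]
  constructor
  · rw [hlen2]; exact hInv.lenR
  · rw [List.length_set]; exact hInv.lenM
  · exact e6
  · exact e7
  · -- markedCol
    intro k hk hmk
    rw [List.length_set] at hk
    by_cases hki : k = index
    · subst hki
      rw [e2 k h1idx]
      exact h1idx
    · rw [List.getElem_set_ne (fun h => hki h.symm)] at hmk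
      have h0 := hInv.markedCol k hk hmk
      have h1 : colOf road1 k ≠ "NONE" := by rw [h1ne k hki]; exact h0
      rw [e2 k h1, h1ne k hki]
      exact h0
  · -- colMark
    intro k hk hcol2
    rw [hlen2] at hk
    by_cases hchg : colOf road2 k = colOf road1 k
    · by_cases hki : k = index
      · subst hki
        exact Or.inl ⟨by rw [List.length_set]; exact hmidx,
          List.getElem_set_self (by simpa using hmidx)⟩
      · have h1 : colOf road1 k = colOf road k := h1ne k hki
        have h0 : colOf road k ≠ "NONE" := by rw [← h1, ← hchg]; exact hcol2
        rcases hInv.colMark k hk h0 with ⟨hb, hm⟩ | hs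
        · exact Or.inl ⟨by rw [List.length_set]; exact hb,
            by rw [List.getElem_set_ne (fun h => hki h.symm)]; exact hm⟩
        · rcases hstack0 k hs with he | hr
          · exact absurd he hki
          · exact Or.inr (e5 k hr)
    · exact Or.inr (e3 k hchg).2
  · -- markedNbrs
    intro k hk hmk j hedge
    rw [List.length_set] at hk
    by_cases hki : k = index
    · subst hki
      have hjmem := (HP k j).mpr hedge
      exact e8 j hjmem
    · rw [List.getElem_set_ne (fun h => hki h.symm)] at hmk
      obtain ⟨hjN, hjne⟩ := hInv.markedNbrs k hk hmk j hedge
      have h1j : colOf road1 j = colOf road j := by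
        by_cases hji : j = index
        · subst hji; exact h1eq hjN
        · exact h1ne j hji
      have h2j : colOf road2 j = colOf road j := by
        rw [e2 j (by rw [h1j]; exact hjN), h1j]
      have h0k : colOf road k ≠ "NONE" := hInv.markedCol k hk hmk
      have h2k : colOf road2 k = colOf road k := by
        rw [e2 k (by rw [h1ne k hki]; exact h0k), h1ne k hki]
      rw [h2j, h2k]
      exact ⟨hjN, hjne⟩

theorem all_marked {mark : List Bool} (h : mark.count true = mark.length) :
    ∀ k, (hk : k < mark.length) → mark[k] = true := by
  intro k hk
  exact (List.count_eq_length.mp h mark[k] (List.getElem_mem hk)).symm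

theorem anchor_min (ends : List (Int × Int)) (road : List (Int × Int × Int × String))
    (mark : List Bool) (index : Nat) (hInv : AInv ends road mark [])
    (hf : mark.findIdx? (fun b => b == false) = some index) :
    index < mark.length ∧ colOf road index = "NONE" ∧ IsMinOf ends index := by
  obtain ⟨hilt, hval, hbefore⟩ := List.findIdx?_eq_some_iff_getElem.mp hf
  have hvi : mark[index] = false := by simpa using hval
  have hiR : index < road.length := by rw [hInv.lenR, ← hInv.lenM]; omega
  have hNONE : colOf road index = "NONE" := by
    by_contra hc
    rcases hInv.colMark index hiR hc with ⟨hb, hm⟩ | hs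
    · rw [hm] at hvi; cases hvi
    · cases hs
  -- the set of marked nodes is closed under graph edges
  have hclosed : ∀ a b, edgeB ends a b = true →
      (∃ h : a < mark.length, mark[a] = true) → (∃ h : b < mark.length, mark[b] = true) := by
    intro a b hedge ⟨ha, hma⟩
    obtain ⟨hbN, -⟩ := hInv.markedNbrs a ha hma b hedge
    have hbR : b < road.length := by
      rw [hInv.lenR]; exact (edgeB_bounds ends hedge).2
    rcases hInv.colMark b hbR hbN with ⟨hb1, hm1⟩ | hs
    · exact ⟨hb1, hm1⟩
    · cases hs
  refine ⟨hilt, hNONE, ?_⟩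
  intro y hconn
  by_contra hylt
  have hy : y < index := by omega
  have hym : mark[y] = true := by
    have := hbefore y hy
    simpa using this
  obtain ⟨p, w⟩ := hconn
  have := walk_closed (fun z => ∃ h : z < mark.length, mark[z] = true) hclosed w.symm
    ⟨by omega, hym⟩
  obtain ⟨hh, hmidx⟩ := this
  rw [hvi] at hmidx
  cases hmidx

theorem aLoop_spec (ends : List (Int × Int)) (partic : List (List Nat))
    (HP : ∀ i j, (j ∈ (partic[i]?).getD []) ↔ edgeB ends i j = true) :
    ∀ road mark stack, AInv ends road mark stack →
    match aLoop partic ends.length road mark stack with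
    | none => ¬ GoodG ends
    | some road2 =>
        road2.length = ends.length ∧
        (∀ i, i < ends.length →
          ∃ p a, colOf road2 i = render p ∧ WalkP ends i a p ∧ IsMinOf ends a) ∧
        (∀ i j, edgeB ends i j = true → colOf road2 i ≠ colOf road2 j) := by
  intro road mark stack
  induction road, mark, stack using aLoop.induct (partic := partic) (m := ends.length) with
  | case1 road mark hcnt hf =>
    intro hInv
    exfalso
    have hall : ∀ b ∈ mark, (fun b => b == false) b = false := List.findIdx?_eq_none_iff.mp hf
    have : mark.count true = mark.length := by
      apply List.count_eq_length.mpr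
      intro b hb
      have := hall b hb
      cases b
      · simp at this
      · rfl
    rw [hInv.lenM] at this
    exact hcnt this
  | case2 road mark hcnt index hf hp =>
    intro hInv
    simp only [dite_eq_ite] at hp
    rw [aLoop, if_pos hcnt]
    obtain ⟨hmlt, hNONE, hmin⟩ := anchor_min ends road mark index hInv hf
    have hiR : index < road.length := by rw [hInv.lenR, ← hInv.lenM]; omega
    have hcols1 : ColsOK ends (setCol road index "i") := by
      intro k hk
      rw [length_setCol] at hk
      by_cases hki : k = index
      · subst hki
        exact Or.inr ⟨false, k, by rw [colOf_setCol_self hiR]; rfl, WalkP.nil k, hmin⟩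
      · rw [colOf_setCol_ne hki]
        exact hInv.cols k hk
    have hspec := aProcess_spec ends index ((partic[index]?).getD [])
      (fun j hj => (HP index j).mp hj) (setCol road index "i") []
      (by rw [length_setCol]; exact hInv.lenR) hcols1 (by simp)
      (by rw [length_setCol]; exact hiR)
      (by rw [colOf_setCol_self hiR]; simp)
    rw [if_pos (by simp [hNONE])] at hp
    rw [hp] at hspec
    split
    · exact hspec
    · rename_i road2 hfeq
      exfalso
      split at hfeq
      · rename_i hfq
        rw [hf] at hfq
        cases hfq
      · rename_i idx hfq
        rw [hf] at hfq
        injection hfq with hid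
        subst hid
        split at hfeq
        · cases hfeq
        · rename_i rs hpq
          rw [if_pos (by simp [hNONE])] at hpq
          rw [hp] at hpq
          cases hpq
  | case3 road mark hcnt index hf rs hp ih =>
    intro hInv
    simp only [dite_eq_ite] at hp
    rw [aLoop, if_pos hcnt]
    obtain ⟨hmlt, hNONE, hmin⟩ := anchor_min ends road mark index hInv hf
    have hiR : index < road.length := by rw [hInv.lenR, ← hInv.lenM]; omega
    have hcols1 : ColsOK ends (setCol road index "i") := by
      intro k hk
      rw [length_setCol] at hk
      by_cases hki : k = index
      · subst hki
        exact Or.inr ⟨false, k, by rw [colOf_setCol_self hiR]; rfl, WalkP.nil k, hmin⟩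
      · rw [colOf_setCol_ne hki]
        exact hInv.cols k hk
    have hspec := aProcess_spec ends index ((partic[index]?).getD [])
      (fun j hj => (HP index j).mp hj) (setCol road index "i") []
      (by rw [length_setCol]; exact hInv.lenR) hcols1 (by simp)
      (by rw [length_setCol]; exact hiR)
      (by rw [colOf_setCol_self hiR]; simp)
    rw [if_pos (by simp [hNONE])] at hp
    rw [hp] at hspec
    obtain ⟨rd2, st2⟩ := rs
    obtain ⟨e1, e2, e3, e4, e5, e6, e7, e8⟩ := hspec
    have hInv2 : AInv ends rd2 (mark.set index true) st2 :=
      aPost_inv ends partic HP road (setCol road index "i") rd2 mark [] [] st2 index hInv hiR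
        (by simp) (by simp) (length_setCol road index "i")
        (fun k hk => colOf_setCol_ne hk "i")
        (by rw [colOf_setCol_self hiR]; simp)
        (fun h => absurd hNONE h)
        e1 e2 e3 (by simp) e6 e7 e8
    have goal2 := ih hInv2
    split
    · rename_i hfeq
      split at hfeq
      · rename_i hfq
        rw [hf] at hfq
        cases hfq
      · rename_i idx hfq
        rw [hf] at hfq
        injection hfq with hid
        subst hid
        split at hfeq
        · rename_i hpq
          rw [if_pos (by simp [hNONE])] at hpq
          rw [hp] at hpq
          cases hpq
        · rename_i rs2 hpq
          rw [if_pos (by simp [hNONE])] at hpq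
          rw [hp] at hpq
          injection hpq with hrs
          subst hrs
          rw [hfeq] at goal2
          exact goal2
    · rename_i road2 hfeq
      split at hfeq
      · rename_i hfq
        rw [hf] at hfq
        cases hfq
      · rename_i idx hfq
        rw [hf] at hfq
        injection hfq with hid
        subst hid
        split at hfeq
        · rename_i hpq
          rw [if_pos (by simp [hNONE])] at hpq
          rw [hp] at hpq
          cases hpq
        · rename_i rs2 hpq
          rw [if_pos (by simp [hNONE])] at hpq
          rw [hp] at hpq
          injection hpq with hrs
          subst hrs
          rw [hfeq] at goal2
          exact goal2
  | case4 road mark hcnt index rest hp =>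
    intro hInv
    simp only [dite_eq_ite] at hp
    rw [aLoop, if_pos hcnt]
    obtain ⟨hiR, hcidx⟩ := hInv.stackMem index (by simp)
    have hro : (if (colOf road index == "NONE") = true then setCol road index "i" else road)
        = road := by rw [if_neg (by simp [hcidx])]
    rw [hro] at hp
    have hstk : ∀ i ∈ rest, i < road.length ∧ colOf road i ≠ "NONE" :=
      fun i hi => hInv.stackMem i (by simp [hi])
    have hspec := aProcess_spec ends index ((partic[index]?).getD [])
      (fun j hj => (HP index j).mp hj) road rest hInv.lenR hInv.cols hstk hiR hcidx
    rw [hp] at hspec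
    split
    · exact hspec
    · rename_i road2 hfeq
      exfalso
      split at hfeq
      · cases hfeq
      · rename_i rs hpq
        rw [hro] at hpq
        rw [hp] at hpq
        cases hpq
  | case5 road mark hcnt index rest rs hp ih =>
    intro hInv
    simp only [dite_eq_ite] at hp
    rw [aLoop, if_pos hcnt]
    obtain ⟨hiR, hcidx⟩ := hInv.stackMem index (by simp)
    have hro : (if (colOf road index == "NONE") = true then setCol road index "i" else road)
        = road := by rw [if_neg (by simp [hcidx])]
    rw [hro] at hp
    have hstk : ∀ i ∈ rest, i < road.length ∧ colOf road i ≠ "NONE" :=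
      fun i hi => hInv.stackMem i (by simp [hi])
    have hspec := aProcess_spec ends index ((partic[index]?).getD [])
      (fun j hj => (HP index j).mp hj) road rest hInv.lenR hInv.cols hstk hiR hcidx
    rw [hp] at hspec
    obtain ⟨rd2, st2⟩ := rs
    obtain ⟨e1, e2, e3, e4, e5, e6, e7, e8⟩ := hspec
    have hInv2 : AInv ends rd2 (mark.set index true) st2 :=
      aPost_inv ends partic HP road road rd2 mark (index :: rest) rest st2 index hInv hiR
        (fun i hi => by simp [hi]) (fun i hi => by simpa using List.mem_cons.mp hi) rfl
        (fun k _ => rfl) hcidx (fun _ => rfl)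
        e1 e2 e3 e5 e6 e7 e8
    have goal2 := ih hInv2
    split
    · rename_i hfeq
      split at hfeq
      · rename_i hpq
        rw [hro] at hpq
        rw [hp] at hpq
        cases hpq
      · rename_i rs2 hpq
        rw [hro] at hpq
        rw [hp] at hpq
        injection hpq with hrs
        subst hrs
        rw [hfeq] at goal2
        exact goal2
    · rename_i road2 hfeq
      split at hfeq
      · rename_i hpq
        rw [hro] at hpq
        rw [hp] at hpq
        cases hpq
      · rename_i rs2 hpq
        rw [hro] at hpq
        rw [hp] at hpq
        injection hpq with hrs
        subst hrs
        rw [hfeq] at goal2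
        exact goal2
  | case6 road mark stack hcnt =>
    intro hInv
    rw [aLoop.eq_def, if_neg hcnt]
    have hcm : mark.count true = mark.length := by
      rw [hInv.lenM]
      omega
    refine ⟨hInv.lenR, ?_, ?_⟩
    · intro i hi
      have hiR : i < road.length := by rw [hInv.lenR]; omega
      have hiM : i < mark.length := by rw [hInv.lenM]; omega
      have hcol := hInv.markedCol i hiM (all_marked hcm i hiM)
      rcases hInv.cols i hiR with h | h
      · exact absurd h hcol
      · exact h
    · intro i j hedge
      have hiM : i < mark.length := by
        rw [hInv.lenM]; exact (edgeB_bounds ends hedge).1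
      have := hInv.markedNbrs i hiM (all_marked hcm i hiM) j hedge
      exact fun h => this.2 h.symm

-- ---- bridges between A's data and B's `ends` ----

theorem bEnds_length (m : Nat) (roads : List (List Int)) : (bEnds m roads).length = m := by
  simp [bEnds]

theorem road0_getElem? (m : Nat) (roads : List (List Int)) (i : Nat) :
    (aNormalize (aBuildRoad m roads))[i]? =
      ((bEnds m roads)[i]?).map (fun e => ((i : Int), e.1, e.2, "NONE")) := by
  by_cases h : i < m
  · simp [aNormalize, aBuildRoad, bEnds, h]
  · simp [aNormalize, aBuildRoad, bEnds, h]

theorem road0_length (m : Nat) (roads : List (List Int)) :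
    (aNormalize (aBuildRoad m roads)).length = m := by
  simp [aNormalize, aBuildRoad]

theorem road0_colOf (m : Nat) (roads : List (List Int)) (i : Nat) (h : i < m) :
    colOf (aNormalize (aBuildRoad m roads)) i = "NONE" := by
  have hb : i < (bEnds m roads).length := by rw [bEnds_length]; exact h
  simp [colOf, road0_getElem?, List.getElem?_eq_getElem hb]

theorem aInterlace_bridge (m : Nat) (roads : List (List Int)) (i j : Nat)
    (hi : i < m) (hj : j < m) :
    aInterlace (((aNormalize (aBuildRoad m roads))[i]?).getD (0, 0, 0, ""))
               (((aNormalize (aBuildRoad m roads))[j]?).getD (0, 0, 0, "")) =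
    bInterlace (((bEnds m roads)[i]?).getD (0, 0)) (((bEnds m roads)[j]?).getD (0, 0)) := by
  have hbi : i < (bEnds m roads).length := by rw [bEnds_length]; exact hi
  have hbj : j < (bEnds m roads).length := by rw [bEnds_length]; exact hj
  rw [road0_getElem?, road0_getElem?, List.getElem?_eq_getElem hbi, List.getElem?_eq_getElem hbj]
  rfl

theorem mem_drop_range {n k j : Nat} : j ∈ (List.range n).drop k ↔ k ≤ j ∧ j < n := by
  constructor
  · intro h
    obtain ⟨idx, hidx, heq⟩ := List.getElem_of_mem h
    rw [List.getElem_drop] at heq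
    have hlen : k + idx < n := by
      have := hidx
      simp [List.length_drop] at this
      omega
    rw [List.getElem_range] at heq
    omega
  · rintro ⟨h1, h2⟩
    rw [List.mem_iff_getElem]
    refine ⟨j - k, ?_, ?_⟩
    · simp [List.length_drop]; omega
    · rw [List.getElem_drop, List.getElem_range]
      omega

def pStepIn (ends : List (Int × Int)) (i : Nat) (P : List (List Nat)) (j : Nat) :
    List (List Nat) :=
  if bInterlace ((ends[i]?).getD (0, 0)) ((ends[j]?).getD (0, 0)) then aAddEdge P i j else P

def pStepOut (ends : List (Int × Int)) (P : List (List Nat)) (i : Nat) : List (List Nat) :=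
  ((List.range ends.length).drop (i + 1)).foldl (pStepIn ends i) P

theorem aAddEdge_length (P : List (List Nat)) (i j : Nat) :
    (aAddEdge P i j).length = P.length := by simp [aAddEdge]

theorem mem_aAddEdge (P : List (List Nat)) (i j : Nat) (hi : i < P.length)
    (hj : j < P.length) (hij : i ≠ j) : ∀ a b,
    (b ∈ ((aAddEdge P i j)[a]?).getD []) ↔
      b ∈ ((P[a]?).getD []) ∨ (a = i ∧ b = j) ∨ (a = j ∧ b = i) := by
  intro a b
  unfold aAddEdge
  have hsj : j < (P.set i ((P[i]?).getD [] ++ [j])).length := by simpa using hj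
  by_cases haj : a = j
  · subst haj
    rw [List.getElem?_set_self hsj]
    rw [List.getElem?_set_ne hij]
    simp [List.getElem?_eq_getElem hj, Ne.symm hij]
    try tauto
  · rw [List.getElem?_set_ne (fun h => haj h.symm)]
    by_cases hai : a = i
    · subst hai
      rw [List.getElem?_set_self hi]
      simp [List.getElem?_eq_getElem hi, haj]
      try tauto
    · rw [List.getElem?_set_ne (fun h => hai h.symm)]
      simp [hai, haj]

theorem inner_spec (ends : List (Int × Int)) (i : Nat) : ∀ (js : List Nat)
    (P : List (List Nat)), i < P.length → (∀ j ∈ js, j < P.length ∧ i ≠ j) →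
    (js.foldl (pStepIn ends i) P).length = P.length ∧
    (∀ a b, (b ∈ ((js.foldl (pStepIn ends i) P)[a]?).getD []) ↔
      b ∈ ((P[a]?).getD []) ∨ ∃ j ∈ js,
        bInterlace ((ends[i]?).getD (0, 0)) ((ends[j]?).getD (0, 0)) = true ∧
        ((a = i ∧ b = j) ∨ (a = j ∧ b = i))) := by
  intro js
  induction js with
  | nil => intro P hi hjs; simp
  | cons j js ih =>
    intro P hi hjs
    have hj := (hjs j (by simp)).1
    have hij := (hjs j (by simp)).2
    have hQlen : (pStepIn ends i P j).length = P.length := by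
      unfold pStepIn; split
      · exact aAddEdge_length P i j
      · rfl
    have hrec := ih (pStepIn ends i P j) (by omega) (fun j' hj' => by
      have := hjs j' (by simp [hj']); omega)
    obtain ⟨hrlen, hrmem⟩ := hrec
    refine ⟨by simpa [hQlen] using hrlen, ?_⟩
    intro a b
    have hQmem : (b ∈ (((pStepIn ends i P j)[a]?).getD [])) ↔
        b ∈ ((P[a]?).getD []) ∨
          (bInterlace ((ends[i]?).getD (0, 0)) ((ends[j]?).getD (0, 0)) = true ∧
            ((a = i ∧ b = j) ∨ (a = j ∧ b = i))) := by
      unfold pStepIn; split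
      · rename_i hcond
        rw [mem_aAddEdge P i j hi hj hij a b]
        tauto
      · rename_i hcond
        simp [hcond]
        try tauto
    rw [List.foldl_cons, hrmem a b, hQmem]
    constructor
    · rintro (((hP | ⟨hint, hpair⟩) ) | ⟨j', hj', hint, hpair⟩)
      · exact Or.inl hP
      · exact Or.inr ⟨j, by simp, hint, hpair⟩
      · exact Or.inr ⟨j', by simp [hj'], hint, hpair⟩
    · rintro (hP | ⟨j', hj', hint, hpair⟩)
      · exact Or.inl (Or.inl hP)
      · rcases List.mem_cons.mp hj' with h | h
        · subst h; exact Or.inl (Or.inr ⟨hint, hpair⟩)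
        · exact Or.inr ⟨j', h, hint, hpair⟩

theorem outer_spec (ends : List (Int × Int)) : ∀ (is : List Nat) (P : List (List Nat)),
    P.length = ends.length → (∀ i ∈ is, i < P.length) →
    ((is.foldl (pStepOut ends) P).length = P.length ∧
    (∀ a b, (b ∈ ((is.foldl (pStepOut ends) P)[a]?).getD []) ↔
      b ∈ ((P[a]?).getD []) ∨ ∃ i ∈ is, ∃ j, i < j ∧ j < ends.length ∧
        bInterlace ((ends[i]?).getD (0, 0)) ((ends[j]?).getD (0, 0)) = true ∧
        ((a = i ∧ b = j) ∨ (a = j ∧ b = i)))) := by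
  intro is
  induction is with
  | nil => intro P hP his; simp
  | cons i is ih =>
    intro P hP his
    have hi : i < P.length := his i (by simp)
    obtain ⟨hilen, himem⟩ := inner_spec ends i ((List.range ends.length).drop (i + 1)) P hi
      (fun j hjmem => by
        have := mem_drop_range.mp hjmem
        constructor <;> omega)
    have hQP : pStepOut ends P i =
        ((List.range ends.length).drop (i + 1)).foldl (pStepIn ends i) P := rfl
    obtain ⟨hrlen, hrmem⟩ := ih (pStepOut ends P i) (by rw [hQP, hilen, hP])
      (fun i' hi' => by rw [hQP, hilen]; exact his i' (by simp [hi']))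
    constructor
    · rw [List.foldl_cons, hrlen, hQP, hilen]
    · intro a b
      rw [List.foldl_cons, hrmem a b, hQP, himem a b]
      constructor
      · rintro ((hP0 | ⟨j, hjmem, hint, hpair⟩) | ⟨i', hi', j, hij, hjlen, hint, hpair⟩)
        · exact Or.inl hP0
        · have := mem_drop_range.mp hjmem
          exact Or.inr ⟨i, by simp, j, by omega, by omega, hint, hpair⟩
        · exact Or.inr ⟨i', by simp [hi'], j, hij, hjlen, hint, hpair⟩
      · rintro (hP0 | ⟨i', hi', j, hij, hjlen, hint, hpair⟩)
        · exact Or.inl (Or.inl hP0)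
        · rcases List.mem_cons.mp hi' with h | h
          · subst h
            exact Or.inl (Or.inr ⟨j, mem_drop_range.mpr ⟨by omega, hjlen⟩, hint, hpair⟩)
          · exact Or.inr ⟨i', h, j, hij, hjlen, hint, hpair⟩

theorem aPartic_eq (m : Nat) (roads : List (List Int)) :
    aPartic (aNormalize (aBuildRoad m roads)) =
      (List.range m).foldl (pStepOut (bEnds m roads))
        ((List.range m).map (fun _ => ([] : List Nat))) := by
  unfold aPartic
  rw [road0_length]
  apply PySem.List.foldl_congr_mem
  intro P i hi
  have him : i < m := List.mem_range.mp hi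
  rw [show pStepOut (bEnds m roads) P i =
    ((List.range (bEnds m roads).length).drop (i + 1)).foldl (pStepIn (bEnds m roads) i) P
    from rfl, bEnds_length]
  apply PySem.List.foldl_congr_mem
  intro P' j hj
  have hjm : j < m := (mem_drop_range.mp hj).2
  unfold pStepIn
  rw [aInterlace_bridge m roads i j him hjm]

theorem aPartic_spec (m : Nat) (roads : List (List Int)) :
    ∀ a b, (b ∈ ((aPartic (aNormalize (aBuildRoad m roads)))[a]?).getD []) ↔
      edgeB (bEnds m roads) a b = true := by
  intro a b
  rw [aPartic_eq]
  have hlen : ((List.range m).map (fun _ => ([] : List Nat))).length = (bEnds m roads).length := by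
    simp [bEnds_length]
  obtain ⟨-, hmem⟩ := outer_spec (bEnds m roads) (List.range m)
    ((List.range m).map (fun _ => ([] : List Nat))) hlen
    (fun i hi => by simpa using List.mem_range.mp hi)
  rw [hmem a b]
  have hinit : ((((List.range m).map (fun _ => ([] : List Nat)))[a]?).getD []) = [] := by
    by_cases ha : a < m
    · simp [List.getElem?_map, List.getElem?_range, ha]
    · rw [List.getElem?_eq_none (by simpa using ha)]; rfl
  rw [hinit]
  simp only [List.not_mem_nil, false_or]
  rw [bEnds_length]
  constructor
  · rintro ⟨i, hi, j, hij, hjm, hint, (⟨ha, hb⟩ | ⟨ha, hb⟩)⟩ <;> subst ha <;> subst hb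
    · simp only [edgeB, bEnds_length]
      have him := List.mem_range.mp hi
      simp [him, hjm, hij, hint]
    · simp only [edgeB, bEnds_length]
      have him := List.mem_range.mp hi
      simp [him, hjm, hij, hint, Nat.lt_asymm hij]
  · intro h
    simp only [edgeB, bEnds_length, Bool.and_eq_true, Bool.or_eq_true,
      decide_eq_true_eq] at h
    obtain ⟨⟨h1 | h1, ham⟩, hbm⟩ := h
    · exact ⟨a, List.mem_range.mpr ham, b, (by simpa using h1.1), hbm,
        (by simpa using h1.2), Or.inl ⟨rfl, rfl⟩⟩
    · exact ⟨b, List.mem_range.mpr hbm, a, (by simpa using h1.1), ham,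
        (by simpa using h1.2), Or.inr ⟨rfl, rfl⟩⟩

-- ---- B-side: the parity union-find computes the same colouring ----

structure BInv (ends : List (Int × Int)) (parent : List Nat) (par : List Bool) : Prop where
  lenP : parent.length = ends.length
  lenQ : par.length = ends.length
  ple : ∀ x, (hx : x < parent.length) → parent[x] ≤ x
  walk : ∀ x, (hx : x < parent.length) → (hx2 : x < par.length) →
      WalkP ends x parent[x] par[x]
  rootpar : ∀ x, (hx : x < parent.length) → (hx2 : x < par.length) →
      parent[x] = x → par[x] = false

theorem bFind_root {parent : List Nat} {par : List Bool} {r : Nat}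
    (h : parent[r]? = some r) (p : Bool) : bFind parent par r p = (r, p) := by
  rw [bFind]
  simp [h]

theorem bFind_xor (parent : List Nat) (par : List Bool) (x : Nat) (p : Bool) :
    bFind parent par x p = ((bFind parent par x false).1, p ^^ (bFind parent par x false).2) := by
  induction x using Nat.strong_induction_on generalizing p with
  | _ x ih =>
    by_cases h : (parent[x]?).getD x < x
    · conv_lhs => rw [bFind]
      conv_rhs => rw [bFind]
      simp only [h, dif_pos, Bool.false_xor]
      rw [ih _ h (p ^^ (par[x]?).getD false), ih _ h ((par[x]?).getD false)]
      simp [Bool.xor_assoc]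
    · conv_lhs => rw [bFind]
      conv_rhs => rw [bFind]
      simp [h]

theorem bFind_spec {ends : List (Int × Int)} {parent : List Nat} {par : List Bool}
    (hInv : BInv ends parent par) :
    ∀ x, x < parent.length →
      WalkP ends x (bFind parent par x false).1 (bFind parent par x false).2 ∧
      (bFind parent par x false).1 ≤ x ∧
      (bFind parent par x false).1 < parent.length ∧
      parent[(bFind parent par x false).1]? = some (bFind parent par x false).1 := by
  intro x
  induction x using Nat.strong_induction_on with
  | _ x ih =>
    intro hx
    have hx2 : x < par.length := by rw [hInv.lenQ, ← hInv.lenP]; exact hx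
    have hple := hInv.ple x hx
    have hgx : (parent[x]?).getD x = parent[x] := by rw [List.getElem?_eq_getElem hx]; rfl
    by_cases hroot : parent[x] = x
    · rw [bFind_root (by rw [List.getElem?_eq_getElem hx, hroot]) false]
      exact ⟨WalkP.nil x, le_refl x, hx, by rw [List.getElem?_eq_getElem hx, hroot]⟩
    · have hlt : parent[x] < x := by omega
      have hy : parent[x] < parent.length := by omega
      rw [bFind]
      simp only [hgx, hlt, dif_pos]
      rw [bFind_xor]
      have hpar : (par[x]?).getD false = par[x] := by rw [List.getElem?_eq_getElem hx2]; rfl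
      obtain ⟨ihw, ihle, ihlt, ihroot⟩ := ih parent[x] hlt hy
      refine ⟨?_, by simp; omega, by simpa using ihlt, by simpa using ihroot⟩
      have hw1 : WalkP ends x parent[x] par[x] := hInv.walk x hx hx2
      have := hw1.trans ihw
      simpa [hpar] using this

theorem bFind_set_root {ends : List (Int × Int)} {parent : List Nat} {par : List Bool}
    (hInv : BInv ends parent par) {r0 r1 : Nat} (c : Bool)
    (hr0 : r0 < parent.length) (hroot : parent[r0]? = some r0) (hlt : r1 < r0)
    (hr1root : parent[r1]? = some r1) :
    ∀ x, x < parent.length →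
      bFind (parent.set r0 r1) (par.set r0 c) x false =
        (if (bFind parent par x false).1 = r0
         then (r1, (bFind parent par x false).2 ^^ c)
         else bFind parent par x false) := by
  intro x
  induction x using Nat.strong_induction_on with
  | _ x ih =>
    intro hx
    have hx2 : x < par.length := by rw [hInv.lenQ, ← hInv.lenP]; exact hx
    have hple := hInv.ple x hx
    have hgx : (parent[x]?).getD x = parent[x] := by rw [List.getElem?_eq_getElem hx]; rfl
    by_cases hxr0 : x = r0
    · subst hxr0
      have hRHS : bFind parent par x false = (x, false) := bFind_root hroot false
      rw [hRHS]
      simp only [if_pos rfl]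
      conv_lhs => rw [bFind]
      have hg1 : ((parent.set x r1)[x]?).getD x = r1 := by
        rw [List.getElem?_set_self hx]; rfl
      simp only [hg1, hlt, dif_pos]
      have hq1 : ((par.set x c)[x]?).getD false = c := by
        rw [List.getElem?_set_self hx2]; rfl
      rw [hq1]
      rw [bFind_root (show ((parent.set x r1))[r1]? = some r1 by
        rw [List.getElem?_set_ne (by omega : x ≠ r1)]; exact hr1root)]
      simp
    · have hgx' : (((parent.set r0 r1))[x]?).getD x = parent[x] := by
        rw [List.getElem?_set_ne (fun h => hxr0 h.symm), List.getElem?_eq_getElem hx]; rfl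
      have hpar' : (((par.set r0 c))[x]?).getD false = par[x] := by
        rw [List.getElem?_set_ne (fun h => hxr0 h.symm), List.getElem?_eq_getElem hx2]; rfl
      have hparx : (par[x]?).getD false = par[x] := by
        rw [List.getElem?_eq_getElem hx2]; rfl
      by_cases hroot' : parent[x] = x
      · rw [bFind_root (by rw [List.getElem?_set_ne (fun h => hxr0 h.symm),
            List.getElem?_eq_getElem hx, hroot'])]
        rw [bFind_root (by rw [List.getElem?_eq_getElem hx, hroot'])]
        simp [hxr0]
      · have hltx : parent[x] < x := by omega
        have hy : parent[x] < parent.length := by omega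
        have hOld : bFind parent par x false =
            ((bFind parent par parent[x] false).1,
              par[x] ^^ (bFind parent par parent[x] false).2) := by
          conv_lhs => rw [bFind]
          simp only [hgx, hltx, dif_pos]
          rw [bFind_xor]
          simp [hparx]
        have hNew : bFind (parent.set r0 r1) (par.set r0 c) x false =
            ((bFind (parent.set r0 r1) (par.set r0 c) parent[x] false).1,
              par[x] ^^ (bFind (parent.set r0 r1) (par.set r0 c) parent[x] false).2) := by
          conv_lhs => rw [bFind]
          simp only [hgx', hltx, dif_pos]
          rw [bFind_xor]
          simp [hpar']
        rw [hNew, hOld, ih parent[x] hltx hy]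
        by_cases hcase : (bFind parent par parent[x] false).1 = r0
        · simp [hcase, Bool.xor_assoc]
        · simp [hcase]

def UFJoined (parent : List Nat) (par : List Bool) (i j : Nat) : Prop :=
  (bFind parent par i false).1 = (bFind parent par j false).1 ∧
  (bFind parent par i false).2 = !(bFind parent par j false).2

theorem bUnion_spec {ends : List (Int × Int)} {parent : List Nat} {par : List Bool}
    (hInv : BInv ends parent par) {i j : Nat} (hi : i < parent.length)
    (hj : j < parent.length) (hedge : edgeB ends i j = true) :
    match bUnion parent par i j with
    | none => ¬ GoodG ends
    | some st =>
        BInv ends st.1 st.2 ∧ UFJoined st.1 st.2 i j ∧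
        ∀ a b, a < parent.length → b < parent.length →
          UFJoined parent par a b → UFJoined st.1 st.2 a b := by
  obtain ⟨wi, hlei, hlti, hrooti⟩ := bFind_spec hInv i hi
  obtain ⟨wj, hlej, hltj, hrootj⟩ := bFind_spec hInv j hj
  unfold bUnion
  simp only [beq_iff_eq]
  by_cases hreq : (bFind parent par i false).1 = (bFind parent par j false).1
  · rw [if_pos hreq]
    by_cases hpeq : (bFind parent par i false).2 = (bFind parent par j false).2
    · rw [if_pos hpeq]
      intro hGood
      have w1 : WalkP ends i j ((bFind parent par i false).2 ^^ (bFind parent par j false).2) :=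
        wi.trans (hreq ▸ wj.symm)
      have w2 := w1.trans (WalkP.edge ((edgeB_symm ends i j).mp hedge))
      have := hGood i _ w2
      rw [hpeq] at this
      simp at this
    · rw [if_neg hpeq]
      refine ⟨hInv, ⟨hreq, ?_⟩, fun a b _ _ h => h⟩
      cases h1 : (bFind parent par i false).2 <;> cases h2 : (bFind parent par j false).2 <;>
        simp_all
  · rw [if_neg hreq]
    by_cases hord : (bFind parent par i false).1 < (bFind parent par j false).1
    · rw [if_pos hord]
      have hset := bFind_set_root hInv ((bFind parent par i false).2 ^^ (bFind parent par j false).2 ^^ true) hltj hrootj hord hrooti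
      have hInv' : BInv ends (parent.set (bFind parent par j false).1 (bFind parent par i false).1) (par.set (bFind parent par j false).1 ((bFind parent par i false).2 ^^ (bFind parent par j false).2 ^^ true)) := by
        constructor
        · simpa using hInv.lenP
        · simpa using hInv.lenQ
        · intro x hx
          simp only [List.length_set] at hx
          by_cases hxe : x = (bFind parent par j false).1
          · subst hxe
            rw [List.getElem_set_self (by omega)]
            omega
          · rw [List.getElem_set_ne (by omega)]
            exact hInv.ple x (by omega)
        · intro x hx hx2
          simp only [List.length_set] at hx hx2
          by_cases hxe : x = (bFind parent par j false).1
          · subst hxe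
            rw [List.getElem_set_self (by omega), List.getElem_set_self (by
              simp only [List.length_set] at hx2 ⊢; omega)]
            have wst := wj.symm.trans ((WalkP.edge ((edgeB_symm ends i j).mp hedge)).trans wi)
            have hb : ((bFind parent par j false).2 ^^ (true ^^ (bFind parent par i false).2)) = ((bFind parent par i false).2 ^^ (bFind parent par j false).2 ^^ true) := by
              cases (bFind parent par i false).2 <;> cases (bFind parent par j false).2 <;> rfl
            rwa [hb] at wst
          · rw [List.getElem_set_ne (by omega), List.getElem_set_ne (by omega)]
            exact hInv.walk x (by omega) (by omega)
        · intro x hx hx2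
          simp only [List.length_set] at hx hx2
          by_cases hxe : x = (bFind parent par j false).1
          · subst hxe
            rw [List.getElem_set_self (by omega)]
            omega
          · rw [List.getElem_set_ne (by omega), List.getElem_set_ne (by omega)]
            exact hInv.rootpar x (by omega) (by omega)
      refine ⟨hInv', ?_, ?_⟩
      · constructor
        · rw [hset i hi, hset j hj]
          rw [if_neg hreq, if_pos rfl]
        · rw [hset i hi, hset j hj]
          rw [if_neg hreq, if_pos rfl]
          cases (bFind parent par i false).2 <;> cases (bFind parent par j false).2 <;> rfl
      · intro a b ha hb hJ
        obtain ⟨hJ1, hJ2⟩ := hJ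
        constructor
        · rw [hset a ha, hset b hb, hJ1]
          split
          · rfl
          · exact hJ1
        · rw [hset a ha, hset b hb, hJ1]
          split
          · simp only
            rw [hJ2]
            cases (bFind parent par b false).2 <;> cases ((bFind parent par i false).2 ^^ (bFind parent par j false).2 ^^ true) <;> rfl
          · exact hJ2
    · rw [if_neg hord]
      have hord' : (bFind parent par j false).1 < (bFind parent par i false).1 := by omega
      have hset := bFind_set_root hInv ((bFind parent par i false).2 ^^ (bFind parent par j false).2 ^^ true) hlti hrooti hord' hrootj
      have hInv' : BInv ends (parent.set (bFind parent par i false).1 (bFind parent par j false).1) (par.set (bFind parent par i false).1 ((bFind parent par i false).2 ^^ (bFind parent par j false).2 ^^ true)) := by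
        constructor
        · simpa using hInv.lenP
        · simpa using hInv.lenQ
        · intro x hx
          simp only [List.length_set] at hx
          by_cases hxe : x = (bFind parent par i false).1
          · subst hxe
            rw [List.getElem_set_self (by omega)]
            omega
          · rw [List.getElem_set_ne (by omega)]
            exact hInv.ple x (by omega)
        · intro x hx hx2
          simp only [List.length_set] at hx hx2
          by_cases hxe : x = (bFind parent par i false).1
          · subst hxe
            rw [List.getElem_set_self (by omega), List.getElem_set_self (by
              simp only [List.length_set] at hx2 ⊢; omega)]
            have wst := wi.symm.trans ((WalkP.edge hedge).trans wj)
            have hb : ((bFind parent par i false).2 ^^ (true ^^ (bFind parent par j false).2)) = ((bFind parent par i false).2 ^^ (bFind parent par j false).2 ^^ true) := by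
              cases (bFind parent par i false).2 <;> cases (bFind parent par j false).2 <;> rfl
            rwa [hb] at wst
          · rw [List.getElem_set_ne (by omega), List.getElem_set_ne (by omega)]
            exact hInv.walk x (by omega) (by omega)
        · intro x hx hx2
          simp only [List.length_set] at hx hx2
          by_cases hxe : x = (bFind parent par i false).1
          · subst hxe
            rw [List.getElem_set_self (by omega)]
            omega
          · rw [List.getElem_set_ne (by omega), List.getElem_set_ne (by omega)]
            exact hInv.rootpar x (by omega) (by omega)
      refine ⟨hInv', ?_, ?_⟩
      · constructor
        · rw [hset i hi, hset j hj]
          rw [if_pos rfl, if_neg (fun h => hreq h.symm)]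
        · rw [hset i hi, hset j hj]
          rw [if_pos rfl, if_neg (fun h => hreq h.symm)]
          cases (bFind parent par i false).2 <;> cases (bFind parent par j false).2 <;> rfl
      · intro a b ha hb hJ
        obtain ⟨hJ1, hJ2⟩ := hJ
        constructor
        · rw [hset a ha, hset b hb, hJ1]
          split
          · rfl
          · exact hJ1
        · rw [hset a ha, hset b hb, hJ1]
          split
          · simp only
            rw [hJ2]
            cases (bFind parent par b false).2 <;> cases ((bFind parent par i false).2 ^^ (bFind parent par j false).2 ^^ true) <;> rfl
          · exact hJ2

theorem foldl_obind_none {σ β : Type} (g : σ → β → Option σ) (js : List β) :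
    js.foldl (fun ost j => ost.bind (fun st => g st j)) none = none := by
  induction js <;> simp [*]

theorem UFJoined_symm {parent : List Nat} {par : List Bool} {i j : Nat}
    (h : UFJoined parent par i j) : UFJoined parent par j i := by
  obtain ⟨h1, h2⟩ := h
  refine ⟨h1.symm, ?_⟩
  rw [h2]
  cases (bFind parent par j false).2 <;> rfl

theorem bInner_spec (ends : List (Int × Int)) (m : Nat) (hm : ends.length = m)
    (i : Nat) (him : i < m) :
    ∀ (js : List Nat) (st : List Nat × List Bool), BInv ends st.1 st.2 →
    (∀ j ∈ js, i < j ∧ j < m) →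
    match js.foldl (fun ost2 j => ost2.bind (fun st2 =>
        if bInterlace ((ends[i]?).getD (0, 0)) ((ends[j]?).getD (0, 0)) then
          bUnion st2.1 st2.2 i j
        else some st2)) (some st) with
    | none => ¬ GoodG ends
    | some st' => BInv ends st'.1 st'.2 ∧
        (∀ a b, a < ends.length → b < ends.length →
          UFJoined st.1 st.2 a b → UFJoined st'.1 st'.2 a b) ∧
        (∀ j ∈ js, bInterlace ((ends[i]?).getD (0, 0)) ((ends[j]?).getD (0, 0)) = true →
          UFJoined st'.1 st'.2 i j) := by
  intro js
  induction js with
  | nil => intro st hInv hjs; exact ⟨hInv, fun a b _ _ h => h, by simp⟩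
  | cons j js ih =>
    intro st hInv hjs
    have hij := (hjs j (by simp)).1
    have hjm := (hjs j (by simp)).2
    rw [List.foldl_cons, Option.bind_some]
    by_cases hcond : bInterlace ((ends[i]?).getD (0, 0)) ((ends[j]?).getD (0, 0)) = true
    · rw [if_pos hcond]
      have hedge : edgeB ends i j = true := by
        simp only [edgeB, Bool.and_eq_true, Bool.or_eq_true, decide_eq_true_eq]
        exact ⟨⟨Or.inl ⟨hij, hcond⟩, by omega⟩, by omega⟩
      have hu := bUnion_spec hInv (by rw [hInv.lenP]; omega) (by rw [hInv.lenP]; omega) hedge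
      cases hb : bUnion st.1 st.2 i j with
      | none =>
        rw [foldl_obind_none]
        rw [hb] at hu
        exact hu
      | some st1 =>
        rw [hb] at hu
        obtain ⟨hInv1, hJ1, hstab1⟩ := hu
        have hrec := ih st1 hInv1 (fun j' hj' => hjs j' (by simp [hj']))
        cases hres : js.foldl _ (some st1) with
        | none => rw [hres] at hrec; exact hrec
        | some st' =>
          rw [hres] at hrec
          obtain ⟨hInv', hstab', hall'⟩ := hrec
          refine ⟨hInv', ?_, ?_⟩
          · intro a b ha hb2 hJ
            exact hstab' a b ha hb2 (hstab1 a b (by rw [hInv.lenP]; omega)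
              (by rw [hInv.lenP]; omega) hJ)
          · intro j' hj' hcond'
            rcases List.mem_cons.mp hj' with h | h
            · subst h
              exact hstab' i j' (by omega) (by omega) hJ1
            · exact hall' j' h hcond'
    · rw [if_neg hcond]
      have hrec := ih st hInv (fun j' hj' => hjs j' (by simp [hj']))
      cases hres : js.foldl _ (some st) with
      | none => rw [hres] at hrec; exact hrec
      | some st' =>
        rw [hres] at hrec
        obtain ⟨hInv', hstab', hall'⟩ := hrec
        refine ⟨hInv', hstab', ?_⟩
        intro j' hj' hcond'
        rcases List.mem_cons.mp hj' with h | h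
        · subst h; exact absurd hcond' hcond
        · exact hall' j' h hcond'

theorem bOuter_none (ends : List (Int × Int)) (m : Nat) (is : List Nat) :
    is.foldl (fun ost i => ((List.range m).drop (i + 1)).foldl (fun ost2 j =>
      ost2.bind (fun st2 =>
        if bInterlace ((ends[i]?).getD (0, 0)) ((ends[j]?).getD (0, 0)) then
          bUnion st2.1 st2.2 i j
        else some st2)) ost) none = none := by
  induction is with
  | nil => rfl
  | cons i is ih => rw [List.foldl_cons, foldl_obind_none]; exact ih

theorem bOuter_spec (ends : List (Int × Int)) (m : Nat) (hm : ends.length = m) :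
    ∀ (is : List Nat) (st : List Nat × List Bool), BInv ends st.1 st.2 →
    (∀ i ∈ is, i < m) →
    match is.foldl (fun ost i => ((List.range m).drop (i + 1)).foldl (fun ost2 j =>
        ost2.bind (fun st2 =>
          if bInterlace ((ends[i]?).getD (0, 0)) ((ends[j]?).getD (0, 0)) then
            bUnion st2.1 st2.2 i j
          else some st2)) ost) (some st) with
    | none => ¬ GoodG ends
    | some st' => BInv ends st'.1 st'.2 ∧
        (∀ a b, a < ends.length → b < ends.length →
          UFJoined st.1 st.2 a b → UFJoined st'.1 st'.2 a b) ∧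
        (∀ i ∈ is, ∀ j, i < j → j < m →
          bInterlace ((ends[i]?).getD (0, 0)) ((ends[j]?).getD (0, 0)) = true →
          UFJoined st'.1 st'.2 i j) := by
  intro is
  induction is with
  | nil => intro st hInv his; exact ⟨hInv, fun a b _ _ h => h, by simp⟩
  | cons i is ih =>
    intro st hInv his
    have him : i < m := his i (by simp)
    rw [List.foldl_cons]
    have hin := bInner_spec ends m hm i him ((List.range m).drop (i + 1)) st hInv
      (fun j hj => by have := mem_drop_range.mp hj; omega)
    cases hres : ((List.range m).drop (i + 1)).foldl _ (some st) with
    | none =>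
      rw [hres] at hin
      rw [bOuter_none]
      exact hin
    | some st1 =>
      rw [hres] at hin
      obtain ⟨hInv1, hstab1, hall1⟩ := hin
      have hrec := ih st1 hInv1 (fun i' hi' => his i' (by simp [hi']))
      cases hres2 : is.foldl _ (some st1) with
      | none => rw [hres2] at hrec; exact hrec
      | some st' =>
        rw [hres2] at hrec
        obtain ⟨hInv', hstab', hall'⟩ := hrec
        refine ⟨hInv', ?_, ?_⟩
        · intro a b ha hb hJ
          exact hstab' a b ha hb (hstab1 a b ha hb hJ)
        · intro i' hi' j hij hjm hcond
          rcases List.mem_cons.mp hi' with h | h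
          · subst h
            have hJ := hall1 j (mem_drop_range.mpr ⟨by omega, hjm⟩) hcond
            exact hstab' i' j (by omega) (by omega) hJ
          · exact hall' i' h j hij hjm hcond

theorem bLoop_spec (m : Nat) (roads : List (List Int)) :
    match bLoop m (bEnds m roads) with
    | none => ¬ GoodG (bEnds m roads)
    | some st =>
        BInv (bEnds m roads) st.1 st.2 ∧
        ∀ i j, edgeB (bEnds m roads) i j = true → UFJoined st.1 st.2 i j := by
  have hm : (bEnds m roads).length = m := bEnds_length m roads
  have hInv0 : BInv (bEnds m roads) (List.range m) (List.replicate m false) := by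
    constructor
    · simp [hm]
    · simp [hm]
    · intro x hx
      simp only [List.length_range] at hx
      simp [List.getElem_range]
    · intro x hx hx2
      simp only [List.length_range] at hx
      rw [List.getElem_range, List.getElem_replicate]
      exact WalkP.nil x
    · intro x hx hx2 _
      exact List.getElem_replicate hx2
  have hout := bOuter_spec (bEnds m roads) m hm (List.range m)
    ((List.range m), (List.replicate m false)) hInv0 (fun i hi => List.mem_range.mp hi)
  unfold bLoop
  cases hres : (List.range m).foldl _ (some (List.range m, List.replicate m false)) with
  | none =>
    rw [hres] at hout
    exact hout
  | some st =>
    rw [hres] at hout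
    obtain ⟨hInv', -, hall'⟩ := hout
    refine ⟨hInv', ?_⟩
    intro i j hedge
    simp only [edgeB, Bool.and_eq_true, Bool.or_eq_true, decide_eq_true_eq] at hedge
    obtain ⟨⟨h1 | h1, ham⟩, hbm⟩ := hedge
    · exact hall' i (List.mem_range.mpr (by omega)) j h1.1 (by omega) h1.2
    · exact UFJoined_symm (hall' j (List.mem_range.mpr (by omega)) i h1.1 (by omega) h1.2)

-- the colouring read off the final union-find state is anchored and proper
theorem walk_bounds {ends : List (Int × Int)} {x y : Nat} {p : Bool}
    (w : WalkP ends x y p) : x = y ∨ (x < ends.length ∧ y < ends.length) := by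
  induction w with
  | nil => exact Or.inl rfl
  | @cons x' y' z' p' h w ih =>
    have hb := edgeB_bounds ends h
    rcases ih with heq | ⟨h1, h2⟩
    · subst heq; exact Or.inr ⟨hb.1, hb.2⟩
    · exact Or.inr ⟨hb.1, h2⟩

theorem rootEq {parent : List Nat} {par : List Bool} {ends : List (Int × Int)}
    (hJ : ∀ i j, edgeB ends i j = true → UFJoined parent par i j)
    {x y : Nat} {p : Bool} (w : WalkP ends x y p) :
    (bFind parent par x false).1 = (bFind parent par y false).1 := by
  induction w with
  | nil => rfl
  | @cons x' y' z' p' h w ih => exact (hJ x' y' h).1.trans ih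

theorem bFinal_cols {ends : List (Int × Int)} {parent : List Nat} {par : List Bool}
    (hInv : BInv ends parent par)
    (hJ : ∀ i j, edgeB ends i j = true → UFJoined parent par i j) :
    (∀ k, k < ends.length →
      ∃ p a, (bFind parent par k false).2 = p ∧ WalkP ends k a p ∧ IsMinOf ends a) ∧
    ProperOn ends (fun k => (bFind parent par k false).2) := by
  constructor
  · intro k hk
    have hkp : k < parent.length := by rw [hInv.lenP]; exact hk
    obtain ⟨wk, hle, hlt, hroot⟩ := bFind_spec hInv k hkp
    refine ⟨(bFind parent par k false).2, (bFind parent par k false).1, rfl, wk, ?_⟩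
    rintro y ⟨p, w⟩
    rcases walk_bounds w with heq | ⟨h1, h2⟩
    · omega
    · have hyp : y < parent.length := by rw [hInv.lenP]; exact h2
      obtain ⟨wy, hley, hlty, hrooty⟩ := bFind_spec hInv y hyp
      have hre := rootEq hJ w
      rw [bFind_root hroot false] at hre
      simp only at hre
      omega
  · intro i j hedge
    exact (hJ i j hedge).2

-- ---- glue ----

theorem foldl_colors (l : List (Int × Int × Int × String)) :
    l.foldl (fun s t => s ++ t.2.2.2) "" = String.join (l.map (fun t => t.2.2.2)) := by
  simp [String.join, List.foldl_map]

theorem colOf_getElem (road : List (Int × Int × Int × String)) (k : Nat)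
    (hk : k < road.length) : colOf road k = road[k].2.2.2 := by
  simp [colOf, List.getElem?_eq_getElem hk]

theorem aGood (ends : List (Int × Int)) (road2 : List (Int × Int × Int × String))
    (hcols : ∀ i, i < ends.length →
      ∃ p a, colOf road2 i = render p ∧ WalkP ends i a p ∧ IsMinOf ends a)
    (hprop : ∀ i j, edgeB ends i j = true → colOf road2 i ≠ colOf road2 j) :
    GoodG ends := by
  apply proper_good (f := fun k => colOf road2 k == "o")
  intro i j hedge
  obtain ⟨hib, hjb⟩ := edgeB_bounds ends hedge
  obtain ⟨pi, ai, hci, -, -⟩ := hcols i hib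
  obtain ⟨pj, aj, hcj, -, -⟩ := hcols j hjb
  have hne : pi ≠ pj := fun h => hprop i j hedge (by rw [hci, hcj, h])
  simp only
  rw [hci, hcj]
  cases pi <;> cases pj <;> first | rfl | (exact absurd rfl hne)

theorem parity_eq {ends : List (Int × Int)} (hGood : GoodG ends) {k a : Nat} {p q : Bool}
    (w1 : WalkP ends k a p) (w2 : WalkP ends k a q) : p = q := by
  have := hGood k _ (w1.trans w2.symm).symm
  cases p <;> cases q <;> simp_all

theorem determine_eq (n m : Int) (roads : List (List Int)) :
    determine_road_placement n m roads = determine_road_placement_alt n m roads := by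
  have hel : (bEnds m.toNat roads).length = m.toNat := bEnds_length m.toNat roads
  have HP := aPartic_spec m.toNat roads
  have hInv0 : AInv (bEnds m.toNat roads) (aNormalize (aBuildRoad m.toNat roads))
      (List.replicate m.toNat false) [] := by
    constructor
    · rw [road0_length, hel]
    · rw [List.length_replicate, hel]
    · intro i hi
      rw [road0_length] at hi
      exact Or.inl (road0_colOf m.toNat roads i hi)
    · intro i hi
      cases hi
    · intro i hi hm
      rw [List.getElem_replicate] at hm
      cases hm
    · intro i hi hcol
      rw [road0_length] at hi
      exact absurd (road0_colOf m.toNat roads i hi) hcol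
    · intro i hi hm
      rw [List.getElem_replicate] at hm
      cases hm
  have hA := aLoop_spec (bEnds m.toNat roads) (aPartic (aNormalize (aBuildRoad m.toNat roads)))
    HP (aNormalize (aBuildRoad m.toNat roads)) (List.replicate m.toNat false) [] hInv0
  have hB := bLoop_spec m.toNat roads
  rw [hel] at hA
  unfold determine_road_placement determine_road_placement_alt
  show (match aLoop (aPartic (aNormalize (aBuildRoad m.toNat roads))) m.toNat
      (aNormalize (aBuildRoad m.toNat roads)) (List.replicate m.toNat false) [] with
    | none => "Impossible"
    | some road2 => road2.foldl (fun s t => s ++ t.2.2.2) "") =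
    (match bLoop m.toNat (bEnds m.toNat roads) with
    | none => "Impossible"
    | some st => String.join ((List.range m.toNat).map
        (fun k => if (bFind st.1 st.2 k false).2 then "o" else "i")))
  cases hAr : aLoop (aPartic (aNormalize (aBuildRoad m.toNat roads))) m.toNat
      (aNormalize (aBuildRoad m.toNat roads)) (List.replicate m.toNat false) [] with
  | none =>
    rw [hAr] at hA
    cases hBr : bLoop m.toNat (bEnds m.toNat roads) with
    | none => rfl
    | some st =>
      rw [hBr] at hB
      obtain ⟨hBInv, hBJ⟩ := hB
      have hGood := proper_good (bFinal_cols hBInv hBJ).2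
      exact absurd hGood hA
  | some road2 =>
    rw [hAr] at hA
    obtain ⟨hlen2, hcols2, hprop2⟩ := hA
    cases hBr : bLoop m.toNat (bEnds m.toNat roads) with
    | none =>
      rw [hBr] at hB
      exact absurd (aGood (bEnds m.toNat roads) road2
        (fun i hi => hcols2 i (by rw [← hel]; exact hi)) hprop2) hB
    | some st =>
      rw [hBr] at hB
      obtain ⟨hBInv, hBJ⟩ := hB
      obtain ⟨hBcols, hBprop⟩ := bFinal_cols hBInv hBJ
      have hGood := proper_good hBprop
      show List.foldl (fun s t => s ++ t.2.2.2) "" road2 =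
        String.join ((List.range m.toNat).map
          (fun k => if (bFind st.1 st.2 k false).2 then "o" else "i"))
      rw [show List.foldl (fun (s : String) (t : Int × Int × Int × String) => s ++ t.2.2.2) "" road2
        = road2.foldl (fun s t => s ++ t.2.2.2) "" from rfl, foldl_colors]
      congr 1
      apply List.ext_getElem
      · simp [hlen2, hel]
      · intro k hk1 hk2
        rw [List.getElem_map, List.getElem_map, List.getElem_range]
        have hkm : k < m.toNat := by simpa using hk2
        have hke : k < (bEnds m.toNat roads).length := by rw [hel]; exact hkm
        have hkr : k < road2.length := by rw [hlen2]; exact hkm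
        obtain ⟨pA, aA, hcA, wA, hmA⟩ := hcols2 k hkm
        obtain ⟨pB, aB, hcB, wB, hmB⟩ := hBcols k hke
        have haa : aA = aB := min_unique hmA hmB ⟨_, wA.symm.trans wB⟩
        have hpp : pA = pB := parity_eq hGood wA (haa ▸ wB)
        rw [← colOf_getElem road2 k hkr, hcA, hpp, ← hcB]
        rfl

-- ===== VERDICT (by name: the statement is the Claim_ definition above) =====
theorem determine_road_placement_spec : Claim_equal_determine_road_placement := by
  intro n m roads _ _
  unfold Spec_determine_road_placement
  exact determine_eq n m roads
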